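-- pv_equiv track=rewrite | github.com/sagarshingare/python-mastery-repo | core_python/generators/generator_examples.py | chunked_generator
-- ===== SOURCE A (Python) =====
-- from collections.abc import Iterable
-- from typing import Generator
--
-- def chunked_generator(sequence: Iterable[int], chunk_size: int) -> Generator[list[int], None, None]:
--     """Yield chunks of the input sequence in fixed-size batches."""
--     chunk: list[int] = []
--     for item in sequence:
--         chunk.append(item)
--         if len(chunk) == chunk_size:
--             yield chunk
--             chunk = []
--     if chunk:
--         yield chunk
-- ===== SOURCE B (Python) =====
-- from itertools import islice
--
-- def chunked_generator(sequence, chunk_size):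
--     """Yield chunks of the input sequence in fixed-size batches."""
--     it = iter(sequence)
--     while True:
--         chunk = list(islice(it, chunk_size))
--         if not chunk:
--             return
--         yield chunk
-- ===== Notes on version B (the rewrite author's own statement) =====
-- stated objective: idiomatic
-- what changed: Replaces the per-item append-and-length-check accumulator with the standard itertools.islice batch draw from a single iterator (C-level batching removes per-item Python bytecode).
-- outside the precondition, e.g. on chunked_generator([1, 2], 0): A returns [[1, 2]], B returns []; on chunked_generator([1], -1): A returns [[1]], B raises ValueError
import Mathlib
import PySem

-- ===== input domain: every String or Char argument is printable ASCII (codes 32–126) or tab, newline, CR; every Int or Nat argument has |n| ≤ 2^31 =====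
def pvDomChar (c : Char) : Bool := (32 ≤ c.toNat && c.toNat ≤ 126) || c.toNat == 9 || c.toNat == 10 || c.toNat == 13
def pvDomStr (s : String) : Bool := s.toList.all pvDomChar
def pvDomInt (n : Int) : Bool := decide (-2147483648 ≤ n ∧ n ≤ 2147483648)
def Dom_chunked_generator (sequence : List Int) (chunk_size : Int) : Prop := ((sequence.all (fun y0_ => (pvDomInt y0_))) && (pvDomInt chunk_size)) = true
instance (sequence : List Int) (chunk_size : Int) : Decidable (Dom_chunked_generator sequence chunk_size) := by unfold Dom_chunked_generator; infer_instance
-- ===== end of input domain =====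

-- B replaces A's per-item append-and-length-check accumulator with an idiomatic
-- islice-style batch draw (take/drop of chunk_size elements at a time); same cost.


-- ===== PORT A =====
-- for item in sequence: chunk.append(item); if len(chunk) == chunk_size: yield chunk; chunk = []
-- then: if chunk: yield chunk
def chunked_generator (sequence : List Int) (chunk_size : Int) : List (List Int) :=
  let s := sequence.foldl
    (fun (s : List (List Int) × List Int) item =>
      let chunk := s.2 ++ [item]
      if (chunk.length : Int) = chunk_size then (s.1 ++ [chunk], []) else (s.1, chunk))
    ([], [])
  if s.2 ≠ [] then s.1 ++ [s.2] else s.1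

-- ===== PORT B =====
-- while True: chunk = list(islice(it, chunk_size)); if not chunk: break; yield chunk
-- islice draws the next chunk_size items = take n / drop n on the remaining list.
def chunkAltLoop (xs : List Int) (n : Nat) : List (List Int) :=
  if h : xs = [] ∨ n = 0 then []
  else xs.take n :: chunkAltLoop (xs.drop n) n
termination_by xs.length
decreasing_by
  push Not at h
  have h1 : 0 < xs.length := List.length_pos_iff.mpr h.1
  simp [List.length_drop]
  omega

-- chunk_size.toNat: under Pre_ (chunk_size ≥ 1) this is exact; B raises for negative sizes, outside Pre_.
def chunked_generator_alt (sequence : List Int) (chunk_size : Int) : List (List Int) :=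
  chunkAltLoop sequence chunk_size.toNat

-- ===== PRECONDITION & SPEC =====
-- Pre_ restricts to the natural domain chunk_size ≥ 1: chunk sizes below 1 are outside the task's
-- meaning, and there the two defensible readings part ways (A emits the whole sequence as one
-- trailing chunk; islice yields nothing for 0 and raises ValueError for a negative size).
def Pre_chunked_generator (sequence : List Int) (chunk_size : Int) : Prop := 1 ≤ chunk_size
instance (sequence : List Int) (chunk_size : Int) : Decidable (Pre_chunked_generator sequence chunk_size) := by unfold Pre_chunked_generator; infer_instance

def pvWitness_chunked_generator : List Int × Int := ([1, 2, 3, 4, 5], 2)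

def Spec_chunked_generator (sequence : List Int) (chunk_size : Int) (out : List (List Int)) : Prop := out = chunked_generator_alt sequence chunk_size
instance (sequence : List Int) (chunk_size : Int) (out : List (List Int)) : Decidable (Spec_chunked_generator sequence chunk_size out) := by unfold Spec_chunked_generator; infer_instance

-- ===== CLAIM (what is proved, stated in full; the proofs are below) =====
def Claim_equal_chunked_generator : Prop := ∀ (sequence : List Int) (chunk_size : Int), Dom_chunked_generator sequence chunk_size → Pre_chunked_generator sequence chunk_size → Spec_chunked_generator sequence chunk_size (chunked_generator sequence chunk_size)

-- ===== LEMMAS AND PROOFS =====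

-- Loop invariant: running A's fold from a partial chunk (shorter than n) and then finalizing
-- equals the already-emitted chunks followed by B's chunking of (chunk ++ xs).
theorem chunk_loop_inv (n : Nat) (hn : 1 ≤ n) :
    ∀ (xs : List Int) (out : List (List Int)) (chunk : List Int), chunk.length < n →
      (let s := xs.foldl
        (fun (s : List (List Int) × List Int) item =>
          let c := s.2 ++ [item]
          if (c.length : Int) = (n : Int) then (s.1 ++ [c], []) else (s.1, c))
        (out, chunk)
       if s.2 ≠ [] then s.1 ++ [s.2] else s.1) = out ++ chunkAltLoop (chunk ++ xs) n := by
  intro xs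
  induction xs with
  | nil =>
    intro out chunk hlt
    simp only [List.foldl_nil, List.append_nil]
    by_cases hc : chunk = []
    · subst hc
      rw [chunkAltLoop]
      simp
    · rw [chunkAltLoop]
      have hn0 : n ≠ 0 := by omega
      rw [dif_neg (by simp [hc, hn0])]
      have ht : chunk.take n = chunk := List.take_of_length_le (by omega)
      have hd : chunk.drop n = [] := List.drop_eq_nil_of_le (by omega)
      rw [ht, hd, chunkAltLoop]
      simp [hc]
  | cons x rest ih =>
    intro out chunk hlt
    simp only [List.foldl_cons]
    by_cases hfull : ((chunk ++ [x]).length : Int) = (n : Int)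
    · rw [if_pos hfull]
      have hlen : (chunk ++ [x]).length = n := by exact_mod_cast hfull
      have := ih (out ++ [chunk ++ [x]]) [] (by simp only [List.length_nil]; omega)
      simp only [List.nil_append] at this
      rw [this]
      have hne : chunk ++ x :: rest = (chunk ++ [x]) ++ rest := by simp
      rw [hne]
      have hn0 : n ≠ 0 := by omega
      have hnil : (chunk ++ [x]) ++ rest ≠ [] := by
        intro hc; have := congrArg List.length hc; simp at this
      conv_rhs => rw [chunkAltLoop]
      rw [dif_neg (fun hc => hc.elim hnil hn0)]
      have ht : ((chunk ++ [x]) ++ rest).take n = chunk ++ [x] := by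
        rw [← hlen, List.take_left]
      have hd : ((chunk ++ [x]) ++ rest).drop n = rest := by
        rw [← hlen, List.drop_left]
      rw [ht, hd]
      simp
    · rw [if_neg hfull]
      have hlen : (chunk ++ [x]).length ≠ n := fun h => hfull (by exact_mod_cast h)
      have hlt' : (chunk ++ [x]).length < n := by
        simp only [List.length_append, List.length_cons, List.length_nil] at *
        omega
      have := ih out (chunk ++ [x]) hlt'
      rw [this]
      simp

-- ===== VERDICT (by name: the statement is the Claim_ definition above) =====
theorem chunked_generator_spec : Claim_equal_chunked_generator := by
  intro sequence chunk_size _ hpre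
  have hn : 1 ≤ chunk_size.toNat := by
    unfold Pre_chunked_generator at hpre; omega
  have hcast : ((chunk_size.toNat : Int)) = chunk_size := by
    unfold Pre_chunked_generator at hpre; omega
  unfold Spec_chunked_generator chunked_generator chunked_generator_alt
  have := chunk_loop_inv chunk_size.toNat hn sequence [] [] (by simp only [List.length_nil]; omega)
  simp only [List.nil_append, hcast] at this
  exact this
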